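-- pv_equiv track=rewrite | github.com/Feng-12138/LooSchedule | data/scraper/courses/getCourseFromUWflow.py | modifyStr
-- ===== SOURCE A (Python) =====
-- def modifyStr(courseStr: str, replacedStr: str) -> str:
--     retval = ""
--     start = ""
--     if replacedStr == "One of":
--         retval = courseStr.replace("One of", "1:")
--         retval = retval.replace("one of", "1:")
--         start = "1:"
--     elif replacedStr == "Two of":
--         retval = courseStr.replace("Two of", "2:")
--         retval = retval.replace("two of", "2:")
--         start = "2:"
--     elif replacedStr == "Three of":
--         retval = courseStr.replace("Three of", "3:")
--         retval = retval.replace("three of", "3:")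
--         start = "3:"
--
--     retval = retval.replace(" ", '')
--     retval = retval.replace("/", ",")
--     retval = retval.replace("or", ",")
--     retval = retval.replace(")", "")
--     retval = retval.replace("(", "")
--     retval = retval.replace(";", "")
--     retval = retval.replace(".", "")
--     curStrList = retval[2:].split(",")
--     retvalStrList = []
--     for item in curStrList:
--         encounterNum = False
--         breakingIndex = len(item)
--         for idx, char in enumerate(item):
--             if (char >= "A" and char <= "Z"):
--                 continue
--             elif char >= "0" and char <= "9":
--                 encounterNum = True
--                 continue
--             if encounterNum:
--                 breakingIndex = idx
--                 break
--         retvalStrList.append(item[:breakingIndex])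
--     retval = ""
--     retval += start
--     for val in retvalStrList:
--         retval += f"{val},"
--     retval = retval[:-1] + ';'
--     return retval
-- ===== SOURCE B (Python) =====
-- import re
--
-- def modifyStr(courseStr: str, replacedStr: str) -> str:
--     starts = {"One of": "1:", "Two of": "2:", "Three of": "3:"}
--     start = starts.get(replacedStr, "")
--     s = courseStr.replace(replacedStr, start).replace(replacedStr.lower(), start) if start else ""
--     for old, new in ((" ", ""), ("/", ","), ("or", ","), (")", ""), ("(", ""), (";", ""), (".", "")):
--         s = s.replace(old, new)
--     kept = []
--     for item in s[2:].split(","):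
--         m = re.match(r'.*?[0-9][A-Z0-9]*', item, re.DOTALL)
--         kept.append(m.group(0) if m else item)
--     return start + ",".join(kept) + ";"
-- ===== Notes on version B (the rewrite author's own statement) =====
-- stated objective: idiomatic
-- what changed: The per-item nested char-scan with an encounterNum flag and breakingIndex is replaced by a single regex cut (re.match(r'.*?[0-9][A-Z0-9]*', item, re.DOTALL)), the if/elif start-code chain by a dict lookup, and the seven chained replaces by one fold over a replacement table; the trailing-comma build-and-strip becomes ','.join.
import Mathlib
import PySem

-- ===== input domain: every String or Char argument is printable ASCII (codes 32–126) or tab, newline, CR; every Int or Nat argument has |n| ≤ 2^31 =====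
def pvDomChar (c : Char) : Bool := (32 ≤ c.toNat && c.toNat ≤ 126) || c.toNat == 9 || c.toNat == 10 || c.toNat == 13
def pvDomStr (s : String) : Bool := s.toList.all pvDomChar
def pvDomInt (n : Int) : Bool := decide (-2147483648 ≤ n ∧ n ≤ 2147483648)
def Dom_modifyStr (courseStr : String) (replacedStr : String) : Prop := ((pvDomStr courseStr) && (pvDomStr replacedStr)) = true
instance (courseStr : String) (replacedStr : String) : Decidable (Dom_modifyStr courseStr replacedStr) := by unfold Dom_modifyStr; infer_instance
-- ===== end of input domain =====

-- B re-implements the per-item char-scan/flag loop by a single regex-style cut (lazy prefix to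
-- the first digit plus the greedy [A-Z0-9] run), with a table lookup for the start code and one
-- fold over a replacement table; objective: more idiomatic, same cost.

-- ===== PORT A =====
-- the inner 'for idx, char in enumerate(item)' loop of A, with its encounterNum flag and
-- breakingIndex (blen starts as len(item)); returns the final breakingIndex
def pvALoop : List Char → Nat → Bool → Nat → Nat
  | [], _, _, blen => blen
  | c :: rest, idx, enc, blen =>
    if 'A' ≤ c ∧ c ≤ 'Z' then pvALoop rest (idx + 1) enc blen
    else if '0' ≤ c ∧ c ≤ '9' then pvALoop rest (idx + 1) true blen
    else if enc then idx else pvALoop rest (idx + 1) enc blen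

def modifyStr (courseStr : String) (replacedStr : String) : String :=
  let p : List Char × List Char :=
    if replacedStr = "One of" then
      (PySem.Chars.replace (PySem.Chars.replace courseStr.toList "One of".toList "1:".toList)
        "one of".toList "1:".toList, "1:".toList)
    else if replacedStr = "Two of" then
      (PySem.Chars.replace (PySem.Chars.replace courseStr.toList "Two of".toList "2:".toList)
        "two of".toList "2:".toList, "2:".toList)
    else if replacedStr = "Three of" then
      (PySem.Chars.replace (PySem.Chars.replace courseStr.toList "Three of".toList "3:".toList)
        "three of".toList "3:".toList, "3:".toList)
    else ([], [])
  let start := p.2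
  let r1 := PySem.Chars.replace p.1 [' '] []
  let r2 := PySem.Chars.replace r1 ['/'] [',']
  let r3 := PySem.Chars.replace r2 "or".toList [',']
  let r4 := PySem.Chars.replace r3 [')'] []
  let r5 := PySem.Chars.replace r4 ['('] []
  let r6 := PySem.Chars.replace r5 [';'] []
  let r7 := PySem.Chars.replace r6 ['.'] []
  let curStrList := PySem.Chars.splitOn (PySem.List.slice r7 (some 2) none) [',']
  let retvalStrList := curStrList.foldl
    (fun acc item =>
      acc ++ [PySem.List.slice item none (some ((pvALoop item 0 false item.length : Nat) : Int))]) []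
  let retval := retvalStrList.foldl (fun r v => r ++ v ++ [',']) start
  String.mk (PySem.List.slice retval none (some (-1)) ++ [';'])

-- ===== PORT B =====
-- hand port of re.match(r'.*?[0-9][A-Z0-9]*', item, re.DOTALL): exact for this pattern — the
-- lazy '.*?' stops at the FIRST digit, then '[A-Z0-9]*' extends greedily; none = no match
def pvRegexCut : List Char → Option (List Char)
  | [] => none
  | c :: rest =>
    if '0' ≤ c ∧ c ≤ '9' then
      some (c :: rest.takeWhile (fun d => decide (('0' ≤ d ∧ d ≤ '9') ∨ ('A' ≤ d ∧ d ≤ 'Z'))))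
    else (pvRegexCut rest).map (c :: ·)

def modifyStr_alt (courseStr : String) (replacedStr : String) : String :=
  let starts : PySem.Dict String String :=
    PySem.Dict.mk [("One of", "1:"), ("Two of", "2:"), ("Three of", "3:")]
  let start := starts.getD replacedStr ""
  let s0 : List Char :=
    if start ≠ "" then
      PySem.Chars.replace (PySem.Chars.replace courseStr.toList replacedStr.toList start.toList)
        (PySem.Chars.lower replacedStr.toList) start.toList
    else []
  let reps : List (List Char × List Char) :=
    [([' '], []), (['/'], [',']), ("or".toList, [',']), ([')'], []), (['('], []), ([';'], []),
      (['.'], [])]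
  let s := reps.foldl (fun t q => PySem.Chars.replace t q.1 q.2) s0
  let kept := (PySem.Chars.splitOn (PySem.List.slice s (some 2) none) [',']).map
    (fun item => (pvRegexCut item).getD item)
  String.mk (start.toList ++ PySem.Chars.join [','] kept ++ [';'])

-- ===== PRECONDITION & SPEC =====
def Spec_modifyStr (courseStr : String) (replacedStr : String) (out : String) : Prop := out = modifyStr_alt courseStr replacedStr
instance (courseStr : String) (replacedStr : String) (out : String) : Decidable (Spec_modifyStr courseStr replacedStr out) := by unfold Spec_modifyStr; infer_instance

-- ===== CLAIM (what is proved, stated in full; the proofs are below) =====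
def Claim_equal_modifyStr : Prop := ∀ (courseStr : String) (replacedStr : String), Dom_modifyStr courseStr replacedStr → Spec_modifyStr courseStr replacedStr (modifyStr courseStr replacedStr)

-- ===== LEMMAS AND PROOFS =====

-- spec of pvALoop with enc = true: some r ↦ the loop breaks at idx + r, none ↦ it returns blen
def pvResT : List Char → Option Nat
  | [] => none
  | c :: rest =>
    if ('0' ≤ c ∧ c ≤ '9') ∨ ('A' ≤ c ∧ c ≤ 'Z') then (pvResT rest).map (· + 1) else some 0

-- spec of pvALoop with enc = false
def pvRes : List Char → Option Nat
  | [] => none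
  | c :: rest =>
    if '0' ≤ c ∧ c ≤ '9' then (pvResT rest).map (· + 1) else (pvRes rest).map (· + 1)

theorem pvALoop_true (rest : List Char) : ∀ (idx blen : Nat),
    pvALoop rest idx true blen = ((pvResT rest).map (fun r => idx + r)).getD blen := by
  induction rest with
  | nil => intro idx blen; rfl
  | cons c cs ih =>
    intro idx blen
    by_cases hU : 'A' ≤ c ∧ c ≤ 'Z'
    · have h1 : pvALoop (c :: cs) idx true blen = pvALoop cs (idx + 1) true blen := by
        simp [pvALoop, hU]
      have h2 : pvResT (c :: cs) = (pvResT cs).map (· + 1) := by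
        simp [pvResT, Or.inr hU]
      rw [h1, ih, h2]
      cases pvResT cs <;>
        simp only [Option.map_none, Option.map_some, Option.getD_none, Option.getD_some] <;> omega
    · by_cases hD : '0' ≤ c ∧ c ≤ '9'
      · have h1 : pvALoop (c :: cs) idx true blen = pvALoop cs (idx + 1) true blen := by
          simp [pvALoop, hU, hD]
        have h2 : pvResT (c :: cs) = (pvResT cs).map (· + 1) := by
          simp [pvResT, Or.inl hD]
        rw [h1, ih, h2]
        cases pvResT cs <;>
          simp only [Option.map_none, Option.map_some, Option.getD_none, Option.getD_some] <;>
          omega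
      · have h1 : pvALoop (c :: cs) idx true blen = idx := by simp [pvALoop, hU, hD]
        have h2 : pvResT (c :: cs) = some 0 := by simp [pvResT, hU, hD]
        rw [h1, h2]; simp

theorem pvALoop_false (item : List Char) : ∀ (idx blen : Nat),
    pvALoop item idx false blen = ((pvRes item).map (fun r => idx + r)).getD blen := by
  induction item with
  | nil => intro idx blen; rfl
  | cons c cs ih =>
    intro idx blen
    by_cases hD : '0' ≤ c ∧ c ≤ '9'
    · by_cases hU : 'A' ≤ c ∧ c ≤ 'Z'
      · exact absurd (hU.1.trans hD.2) (by decide)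
      · have h1 : pvALoop (c :: cs) idx false blen = pvALoop cs (idx + 1) true blen := by
          simp [pvALoop, hU, hD]
        have h2 : pvRes (c :: cs) = (pvResT cs).map (· + 1) := by simp [pvRes, hD]
        rw [h1, pvALoop_true, h2]
        cases pvResT cs <;>
          simp only [Option.map_none, Option.map_some, Option.getD_none, Option.getD_some] <;>
          omega
    · have h2 : pvRes (c :: cs) = (pvRes cs).map (· + 1) := by simp [pvRes, hD]
      have h1 : pvALoop (c :: cs) idx false blen = pvALoop cs (idx + 1) false blen := by
        by_cases hU : 'A' ≤ c ∧ c ≤ 'Z' <;> simp [pvALoop, hU, hD]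
      rw [h1, ih, h2]
      cases pvRes cs <;>
        simp only [Option.map_none, Option.map_some, Option.getD_none, Option.getD_some] <;> omega

theorem pvALoop_zero (item : List Char) :
    pvALoop item 0 false item.length = (pvRes item).getD item.length := by
  rw [pvALoop_false]
  cases pvRes item <;> simp

theorem take_pvResT (cs : List Char) :
    cs.take ((pvResT cs).getD cs.length)
      = cs.takeWhile (fun d => decide (('0' ≤ d ∧ d ≤ '9') ∨ ('A' ≤ d ∧ d ≤ 'Z'))) := by
  induction cs with
  | nil => rfl
  | cons c rest ih =>
    by_cases hc : ('0' ≤ c ∧ c ≤ '9') ∨ ('A' ≤ c ∧ c ≤ 'Z')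
    · simp only [pvResT, if_pos hc, List.takeWhile_cons, decide_eq_true hc]
      cases h : pvResT rest <;>
        simp only [h, Option.map_none, Option.map_some, Option.getD_none, Option.getD_some,
          List.length_cons, List.take_succ_cons, List.cons.injEq, true_and] <;>
        [skip; skip] <;> rw [← ih] <;> simp [h]
    · simp [pvResT, if_neg hc, List.takeWhile_cons, hc]

theorem take_pvRes (item : List Char) :
    item.take ((pvRes item).getD item.length) = (pvRegexCut item).getD item := by
  induction item with
  | nil => rfl
  | cons c rest ih =>
    by_cases hD : '0' ≤ c ∧ c ≤ '9'
    · simp only [pvRes, pvRegexCut, if_pos hD]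
      cases h : pvResT rest <;>
        simp only [h, Option.map_none, Option.map_some, Option.getD_none, Option.getD_some,
          List.length_cons, List.take_succ_cons, List.cons.injEq, true_and] <;>
        rw [← take_pvResT rest] <;> simp [h]
    · simp only [pvRes, pvRegexCut, if_neg hD]
      cases h : pvRes rest <;> cases hg : pvRegexCut rest <;>
        simp only [h, hg, Option.map_none, Option.map_some, Option.getD_none, Option.getD_some,
          List.length_cons, List.take_succ_cons, List.cons.injEq, true_and] <;>
        · have := ih; rw [h, hg] at this; simpa using this

theorem splitOn_go_ne_nil (sep : List Char) :
    ∀ (fuel : Nat) (l cur : List Char) (acc : List (List Char)),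
      PySem.Chars.splitOn.go sep fuel l cur acc ≠ [] := by
  intro fuel
  induction fuel with
  | zero => intro l cur acc; simp [PySem.Chars.splitOn.go]
  | succ n ih =>
    intro l cur acc
    cases l with
    | nil => simp [PySem.Chars.splitOn.go]
    | cons c rest =>
      simp only [PySem.Chars.splitOn.go]
      split
      · exact ih _ _ _
      · exact ih _ _ _

theorem splitOn_ne_nil (s sep : List Char) : PySem.Chars.splitOn s sep ≠ [] := by
  unfold PySem.Chars.splitOn
  exact splitOn_go_ne_nil sep _ _ _ _

theorem foldl_comma_join (L : List (List Char)) (hL : L ≠ []) : ∀ (s : List Char),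
    (L.foldl (fun r v => r ++ v ++ [',']) s).dropLast = s ++ PySem.Chars.join [','] L := by
  induction L with
  | nil => exact absurd rfl hL
  | cons v rest ih =>
    intro s
    cases rest with
    | nil =>
      show ((s ++ v) ++ [',']).dropLast = s ++ PySem.Chars.join [','] [v]
      rw [List.dropLast_concat, PySem.Chars.join_singleton]
    | cons w rest' =>
      show ((w :: rest').foldl (fun r v => r ++ v ++ [',']) (s ++ v ++ [','])).dropLast = _
      rw [ih (by simp) (s ++ v ++ [','])]
      rw [PySem.Chars.join_cons_cons]
      simp

-- the common tail of both ports, once start and the fully-replaced string agree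
theorem pv_core (start s : List Char) :
    String.mk (PySem.List.slice
        (((PySem.Chars.splitOn (PySem.List.slice s (some 2) none) [',']).foldl
            (fun acc item =>
              acc ++ [PySem.List.slice item none
                (some ((pvALoop item 0 false item.length : Nat) : Int))]) []).foldl
          (fun r v => r ++ v ++ [',']) start) none (some (-1)) ++ [';'])
      = String.mk (start ++ PySem.Chars.join [',']
          ((PySem.Chars.splitOn (PySem.List.slice s (some 2) none) [',']).map
            (fun item => (pvRegexCut item).getD item)) ++ [';']) := by
  have hmap : ((PySem.Chars.splitOn (PySem.List.slice s (some 2) none) [',']).foldl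
      (fun acc item =>
        acc ++ [PySem.List.slice item none
          (some ((pvALoop item 0 false item.length : Nat) : Int))]) [])
      = (PySem.Chars.splitOn (PySem.List.slice s (some 2) none) [',']).map
          (fun item => (pvRegexCut item).getD item) := by
    rw [PySem.List.foldl_append_singleton_eq_map]
    refine List.map_congr_left (fun item _ => ?_)
    rw [PySem.List.slice_to_natCast, pvALoop_zero, take_pvRes]
  have hne : (PySem.Chars.splitOn (PySem.List.slice s (some 2) none) [',']).map
      (fun item => (pvRegexCut item).getD item) ≠ [] := by
    simp only [ne_eq, List.map_eq_nil_iff]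
    exact splitOn_ne_nil _ _
  rw [hmap, PySem.List.slice_to_neg_one, foldl_comma_join _ hne start]

-- ===== VERDICT (by name: the statement is the Claim_ definition above) =====
theorem modifyStr_spec : Claim_equal_modifyStr := by
  unfold Claim_equal_modifyStr
  intro courseStr replacedStr _
  unfold Spec_modifyStr modifyStr modifyStr_alt
  by_cases h1 : replacedStr = "One of"
  · subst h1
    have hd : (PySem.Dict.mk [("One of", "1:"), ("Two of", "2:"), ("Three of", "3:")] :
        PySem.Dict String String).getD "One of" "" = "1:" := by decide
    have hl : PySem.Chars.lower ("One of".toList) = "one of".toList := by decide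
    simp only [hd, hl, if_pos rfl, reduceIte, List.foldl]
    exact pv_core _ _
  · by_cases h2 : replacedStr = "Two of"
    · subst h2
      have hd : (PySem.Dict.mk [("One of", "1:"), ("Two of", "2:"), ("Three of", "3:")] :
          PySem.Dict String String).getD "Two of" "" = "2:" := by decide
      have hl : PySem.Chars.lower ("Two of".toList) = "two of".toList := by decide
      simp only [hd, hl, if_pos rfl, reduceIte, List.foldl]
      exact pv_core _ _
    · by_cases h3 : replacedStr = "Three of"
      · subst h3
        have hd : (PySem.Dict.mk [("One of", "1:"), ("Two of", "2:"), ("Three of", "3:")] :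
            PySem.Dict String String).getD "Three of" "" = "3:" := by decide
        have hl : PySem.Chars.lower ("Three of".toList) = "three of".toList := by decide
        simp only [hd, hl, if_pos rfl, reduceIte, List.foldl]
        exact pv_core _ _
      · have hd : (PySem.Dict.mk [("One of", "1:"), ("Two of", "2:"), ("Three of", "3:")] :
            PySem.Dict String String).getD replacedStr "" = "" := by
          simp [PySem.Dict.getD_eq_get?_getD, PySem.Dict.get?_mk_cons, beq_iff_eq,
            Ne.symm h1, Ne.symm h2, Ne.symm h3, PySem.Dict.get?]
        simp only [hd, if_neg h1, if_neg h2, if_neg h3, reduceIte, List.foldl, ne_eq,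
          not_true_eq_false]
        exact pv_core _ _
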